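-- pv_equiv track=rewrite | github.com/NG85/autoflow | backend/app/api/routes/menu_config.py | _prune_orphan_children
-- ===== SOURCE A (Python) =====
-- from typing import Any
--
-- def _prune_orphan_children(menus: list[dict[str, Any]]) -> list[dict[str, Any]]:
--     """Remove children whose parent_key references a menu not in the list.
--     Iterates until stable, so grandchildren of removed parents are also pruned."""
--     result = list(menus)
--     changed = True
--     while changed:
--         present_keys = {m.get("key") for m in result if m.get("key")}
--         before = len(result)
--         result = [
--             m for m in result
--             if not m.get("parent_key") or m.get("parent_key") in present_keys
--         ]
--         changed = len(result) < before
--     return result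
-- ===== SOURCE B (Python) =====
-- from typing import Any
--
-- def _prune_orphan_children(menus: list[dict[str, Any]]) -> list[dict[str, Any]]:
--     """Index parent values by key once, run the until-stable fixpoint on the
--     (small) key set only, then filter the menu list in a single final pass."""
--     parents: dict[str, list] = {}
--     for m in menus:
--         k = m.get("key")
--         if k:
--             parents.setdefault(k, []).append(m.get("parent_key"))
--     keys = set(parents)
--     while True:
--         new_keys = {k for k in keys
--                     if any(not p or p in keys for p in parents[k])}
--         if new_keys == keys:
--             break
--         keys = new_keys
--     return [m for m in menus
--             if not m.get("parent_key") or m.get("parent_key") in keys]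
-- ===== Notes on version B (the rewrite author's own statement) =====
-- stated objective: alternative
-- what changed: B builds a key->parent-values index once, runs the until-stable fixpoint over the distinct key set only, and filters the menu list in one final pass, instead of A's re-scanning and re-filtering the whole menu list on every round.
import Mathlib
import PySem

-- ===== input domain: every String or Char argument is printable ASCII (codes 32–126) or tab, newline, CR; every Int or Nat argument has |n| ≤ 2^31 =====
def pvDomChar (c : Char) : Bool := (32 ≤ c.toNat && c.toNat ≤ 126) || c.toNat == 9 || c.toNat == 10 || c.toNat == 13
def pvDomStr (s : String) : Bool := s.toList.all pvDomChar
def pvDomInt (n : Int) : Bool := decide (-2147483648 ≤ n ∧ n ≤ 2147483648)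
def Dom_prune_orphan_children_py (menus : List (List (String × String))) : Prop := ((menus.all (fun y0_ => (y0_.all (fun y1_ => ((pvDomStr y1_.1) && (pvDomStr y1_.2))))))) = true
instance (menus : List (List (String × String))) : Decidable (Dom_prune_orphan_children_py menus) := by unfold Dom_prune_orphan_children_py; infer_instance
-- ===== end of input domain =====

-- B replaces A's until-stable refiltering of the whole menu list by a key→parents
-- index built once, a fixpoint on the key set only, and a single final filter pass.

-- shared helpers: Python dict/str primitives both sources use literally
-- m.get(k) on a str→str dict (association list, first match)
def pvGet (m : List (String × String)) (k : String) : Option String :=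
  (m.find? (fun p => p.1 == k)).map (·.2)

-- m.get("key") when truthy (Python: `if m.get("key")` / `if k:`), else none
def pvTruthyKey (m : List (String × String)) : Option String :=
  match pvGet m "key" with
  | some s => if s = "" then none else some s
  | none => none

-- Python `not p or p in keys` for an Optional[str] p
def pvPok (S : PySem.Set String) (p : Option String) : Bool :=
  match p with
  | none => true
  | some q => q == "" || PySem.Set.contains S q

-- Python `not m.get("parent_key") or m.get("parent_key") in keys`
def pvOk (S : PySem.Set String) (m : List (String × String)) : Bool :=
  pvPok S (pvGet m "parent_key")

-- ===== PORT A =====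
-- one body of the `while changed:` loop: compute present_keys, refilter
def pvStepA (result : List (List (String × String))) : List (List (String × String)) :=
  let present : PySem.Set String := PySem.Set.ofList (result.filterMap pvTruthyKey)
  result.filter (pvOk present)

-- the `while changed:` loop; terminates because the list filter shrinks
def pruneLoopA (result : List (List (String × String))) : List (List (String × String)) :=
  let next := pvStepA result
  if _h : next.length < result.length then pruneLoopA next else next
termination_by result.length
decreasing_by exact _h

def prune_orphan_children_py (menus : List (List (String × String))) : List (List (String × String)) :=
  pruneLoopA menus

-- ===== PORT B =====
-- one body of the index-building loop: `k = m.get("key"); if k: … append(…)`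
def pvBPStep (d : PySem.Dict String (List (Option String))) (m : List (String × String)) :
    PySem.Dict String (List (Option String)) :=
  match pvTruthyKey m with
  | some k => d.modify k [] (fun l => l ++ [pvGet m "parent_key"])
  | none => d

-- the `for m in menus:` index-building loop
def pvBuildParents (menus : List (List (String × String))) : PySem.Dict String (List (Option String)) :=
  menus.foldl pvBPStep PySem.Dict.empty

-- used by the loop's decreasing_by (cited by name there)
theorem pvSetEqual_of_memEq (S T : PySem.Set String) (h : ∀ x, x ∈ S ↔ x ∈ T) :
    PySem.Set.equal S T = true := by
  simp only [PySem.Set.equal, PySem.Set.issubset, PySem.Set.contains, Bool.and_eq_true,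
    List.all_eq_true]
  exact ⟨fun x hx => List.contains_iff_mem.mpr ((h x).mp hx),
         fun x hx => List.contains_iff_mem.mpr ((h x).mpr hx)⟩

-- B's new_keys: the key set filtered by per-key survival read off the index
def pvNewKeys (parents : PySem.Dict String (List (Option String)))
    (keys : PySem.Set String) : PySem.Set String :=
  keys.filter (fun k => (parents.getD k []).any (fun p => pvPok keys p))

-- B's `while True:` fixpoint over the key set; new_keys is a filter (hence a
-- sublist) of keys, so a failed equality test means the set strictly shrank
def pruneLoopB (parents : PySem.Dict String (List (Option String)))
    (menus : List (List (String × String))) (keys : PySem.Set String) :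
    List (List (String × String)) :=
  let newKeys := pvNewKeys parents keys
  if PySem.Set.equal newKeys keys then menus.filter (pvOk keys)
  else pruneLoopB parents menus newKeys
termination_by keys.length
decreasing_by
  rename_i hne
  have hne2 : ¬ PySem.Set.equal (pvNewKeys parents keys) keys = true := hne
  clear hne
  have hsub : (pvNewKeys parents keys).Sublist keys := List.filter_sublist
  rcases Nat.lt_or_ge (pvNewKeys parents keys).length keys.length with h | h
  · exact h
  · exact absurd (by rw [hsub.eq_of_length (Nat.le_antisymm hsub.length_le h)]
                     exact pvSetEqual_of_memEq _ _ (fun x => Iff.rfl)) hne2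

def prune_orphan_children_py_alt (menus : List (List (String × String))) : List (List (String × String)) :=
  let parents := pvBuildParents menus
  pruneLoopB parents menus (PySem.Set.ofList parents.keys)

-- ===== PRECONDITION & SPEC =====
def Spec_prune_orphan_children_py (menus : List (List (String × String))) (out : List (List (String × String))) : Prop := out = prune_orphan_children_py_alt menus
instance (menus : List (List (String × String))) (out : List (List (String × String))) : Decidable (Spec_prune_orphan_children_py menus out) := by unfold Spec_prune_orphan_children_py; infer_instance

-- ===== CLAIM (what is proved, stated in full; the proofs are below) =====
def Claim_equal_prune_orphan_children_py : Prop := ∀ (menus : List (List (String × String))), Dom_prune_orphan_children_py menus → Spec_prune_orphan_children_py menus (prune_orphan_children_py menus)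

-- ===== LEMMAS AND PROOFS =====

-- membership-level equality of key sets (all uses of a key set are via `contains`)
def pvMemEq (S T : List String) : Prop := ∀ x, x ∈ S ↔ x ∈ T

-- A's `present_keys` of a state list
def pvSA (r : List (List (String × String))) : PySem.Set String :=
  PySem.Set.ofList (r.filterMap pvTruthyKey)

theorem pvMem_SA (r : List (List (String × String))) (x : String) :
    x ∈ pvSA r ↔ ∃ m ∈ r, pvTruthyKey m = some x := by
  simp [pvSA, PySem.Set.mem_ofList, List.mem_filterMap]

theorem pvContains_eq_of_memEq {S T : List String} (h : pvMemEq S T) (q : String) :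
    PySem.Set.contains S q = PySem.Set.contains T q := by
  simp only [PySem.Set.contains]
  by_cases hq : q ∈ S
  · rw [List.contains_iff_mem.mpr hq, List.contains_iff_mem.mpr ((h q).mp hq)]
  · have : q ∉ T := fun ht => hq ((h q).mpr ht)
    rw [Bool.eq_iff_iff]
    simp [hq, this]

theorem pvPok_congr {S T : List String} (h : pvMemEq S T) (p : Option String) :
    pvPok S p = pvPok T p := by
  cases p with
  | none => rfl
  | some q => simp only [pvPok, pvContains_eq_of_memEq h]

theorem pvOk_congr {S T : List String} (h : pvMemEq S T) (m : List (String × String)) :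
    pvOk S m = pvOk T m := pvPok_congr h _

theorem pvPok_mono {S T : List String} (h : ∀ x, x ∈ S → x ∈ T) (p : Option String)
    (hp : pvPok S p = true) : pvPok T p = true := by
  cases p with
  | none => rfl
  | some q =>
    simp only [pvPok, Bool.or_eq_true, List.contains_iff_mem, PySem.Set.contains] at hp ⊢
    rcases hp with hq | hq
    · exact Or.inl hq
    · exact Or.inr (h q hq)

theorem pvOk_mono {S T : List String} (h : ∀ x, x ∈ S → x ∈ T) (m : List (String × String))
    (hm : pvOk S m = true) : pvOk T m = true := pvPok_mono h _ hm

-- characterisation of the parents index: value list at k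
theorem pvBuildParents_getD (menus : List (List (String × String)))
    (d : PySem.Dict String (List (Option String))) (k : String) :
    (menus.foldl pvBPStep d).getD k []
    = d.getD k [] ++ (menus.filter (fun m => pvTruthyKey m == some k)).map
        (fun m => pvGet m "parent_key") := by
  induction menus generalizing d with
  | nil => simp
  | cons m rest ih =>
    rw [List.foldl_cons, List.filter_cons]
    cases hm : pvTruthyKey m with
    | none =>
      have hstep : pvBPStep d m = d := by simp [pvBPStep, hm]
      simp [hstep, ih]
    | some j =>
      have hstep : pvBPStep d m = d.insert j (d.getD j [] ++ [pvGet m "parent_key"]) := by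
        simp [pvBPStep, hm, PySem.Dict.modify]
      by_cases hk : k = j
      · subst hk
        rw [hstep, ih, PySem.Dict.getD_insert, if_pos rfl]
        simp
      · rw [hstep, ih, PySem.Dict.getD_insert, if_neg hk]
        simp only [beq_iff_eq, Option.some_inj]
        rw [if_neg (fun h => hk h.symm)]

-- characterisation of the parents index: key membership
theorem pvBuildParents_contains (menus : List (List (String × String)))
    (d : PySem.Dict String (List (Option String))) (k : String) :
    (menus.foldl pvBPStep d).contains k = true
    ↔ d.contains k = true ∨ ∃ m ∈ menus, pvTruthyKey m = some k := by
  induction menus generalizing d with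
  | nil => simp
  | cons m rest ih =>
    rw [List.foldl_cons]
    cases hm : pvTruthyKey m with
    | none =>
      have hstep : pvBPStep d m = d := by simp [pvBPStep, hm]
      rw [hstep, ih]
      constructor
      · rintro (h | ⟨m', hm', hk⟩)
        · exact Or.inl h
        · exact Or.inr ⟨m', List.mem_cons_of_mem _ hm', hk⟩
      · rintro (h | ⟨m', hm', hk⟩)
        · exact Or.inl h
        · rcases List.mem_cons.mp hm' with rfl | hm'
          · simp [hm] at hk
          · exact Or.inr ⟨m', hm', hk⟩
    | some j =>
      have hstep : pvBPStep d m = d.insert j (d.getD j [] ++ [pvGet m "parent_key"]) := by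
        simp [pvBPStep, hm, PySem.Dict.modify]
      rw [hstep, ih]
      simp only [PySem.Dict.contains_insert, Bool.or_eq_true, beq_iff_eq]
      constructor
      · rintro ((rfl | h) | ⟨m', hm', hk⟩)
        · exact Or.inr ⟨m, List.mem_cons_self, hm⟩
        · exact Or.inl h
        · exact Or.inr ⟨m', List.mem_cons_of_mem _ hm', hk⟩
      · rintro (h | ⟨m', hm', hk⟩)
        · exact Or.inl (Or.inr h)
        · rcases List.mem_cons.mp hm' with rfl | hm'
          · rw [hm] at hk; exact Or.inl (Or.inl (Option.some_inj.mp hk).symm)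
          · exact Or.inr ⟨m', hm', hk⟩

-- B's per-key survival test, read back on the menu list
theorem pvGood_iff (menus : List (List (String × String))) (S : PySem.Set String) (k : String) :
    ((pvBuildParents menus).getD k []).any (fun p => pvPok S p) = true
    ↔ ∃ m ∈ menus, pvTruthyKey m = some k ∧ pvPok S (pvGet m "parent_key") = true := by
  rw [pvBuildParents, pvBuildParents_getD]
  simp [List.any_eq_true]

theorem pvSetEqual_iff (S T : PySem.Set String) :
    PySem.Set.equal S T = true ↔ pvMemEq S T := by
  constructor
  · intro h x
    simp only [PySem.Set.equal, PySem.Set.issubset, PySem.Set.contains, Bool.and_eq_true,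
      List.all_eq_true] at h
    exact ⟨fun hx => List.contains_iff_mem.mp (h.1 x hx),
           fun hx => List.contains_iff_mem.mp (h.2 x hx)⟩
  · exact pvSetEqual_of_memEq S T

-- one round of the joint simulation, with the induction hypothesis abstracted
theorem pvMainStep (menus : List (List (String × String)))
    (S : PySem.Set String) (r : List (List (String × String)))
    (IH : ∀ (S' : PySem.Set String) (r' : List (List (String × String))),
      S'.length < S.length →
      (∀ X : PySem.Set String, (∀ x, x ∈ X → x ∈ S') →
        r'.filter (pvOk X) = menus.filter (pvOk X)) →
      pvMemEq S' (pvSA r') →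
      pruneLoopA r' = pruneLoopB (pvBuildParents menus) menus S')
    (h1 : ∀ X : PySem.Set String, (∀ x, x ∈ X → x ∈ S) →
      r.filter (pvOk X) = menus.filter (pvOk X))
    (h3 : pvMemEq S (pvSA r)) :
    pruneLoopA r = pruneLoopB (pvBuildParents menus) menus S := by
  have hstep : pvStepA r = r.filter (pvOk (pvSA r)) := rfl
  have fcong : ∀ m, pvOk (pvSA r) m = pvOk S m :=
    fun m => pvOk_congr (fun x => (h3 x).symm) m
  have f1 : r.filter (pvOk (pvSA r)) = menus.filter (pvOk (pvSA r)) :=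
    h1 (pvSA r) (fun x hx => (h3 x).mpr hx)
  have f3 : pvStepA r = menus.filter (pvOk S) := by
    rw [hstep, f1]; exact List.filter_congr (fun m _ => fcong m)
  have hmemr' : ∀ m, m ∈ pvStepA r ↔ m ∈ menus ∧ pvOk S m = true := by
    intro m; rw [f3]; simp [List.mem_filter]
  have hS'mem : ∀ k, k ∈ pvNewKeys (pvBuildParents menus) S ↔
      k ∈ S ∧ ∃ m ∈ menus, pvTruthyKey m = some k ∧ pvOk S m = true := by
    intro k
    unfold pvNewKeys
    rw [List.mem_filter]
    constructor
    · rintro ⟨hk, hg⟩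
      exact ⟨hk, (pvGood_iff menus S k).mp hg⟩
    · rintro ⟨hk, hg⟩
      exact ⟨hk, (pvGood_iff menus S k).mpr hg⟩
  have hSA' : ∀ k, k ∈ pvSA (pvStepA r) ↔
      ∃ m ∈ menus, pvTruthyKey m = some k ∧ pvOk S m = true := by
    intro k
    rw [pvMem_SA]
    constructor
    · rintro ⟨m, hm, hk⟩
      rcases (hmemr' m).mp hm with ⟨hmm, hok⟩
      exact ⟨m, hmm, hk, hok⟩
    · rintro ⟨m, hm, hk, hok⟩
      exact ⟨m, (hmemr' m).mpr ⟨hm, hok⟩, hk⟩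
  have hsub' : ∀ k, k ∈ pvSA (pvStepA r) → k ∈ S := by
    intro k hk
    rcases (pvMem_SA _ k).mp hk with ⟨m, hm, hkm⟩
    have hmr : m ∈ r := by
      rw [hstep] at hm; exact List.mem_of_mem_filter hm
    exact (h3 k).mpr ((pvMem_SA r k).mpr ⟨m, hmr, hkm⟩)
  have f2 : pvMemEq (pvNewKeys (pvBuildParents menus) S) (pvSA (pvStepA r)) := by
    intro k
    rw [hS'mem, hSA']
    constructor
    · rintro ⟨_, h⟩; exact h
    · intro h; exact ⟨hsub' k ((hSA' k).mpr h), h⟩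
  have hsubS' : (pvNewKeys (pvBuildParents menus) S).Sublist S := List.filter_sublist
  rw [pruneLoopA, pruneLoopB]
  show (if _h : (pvStepA r).length < r.length then pruneLoopA (pvStepA r) else pvStepA r)
      = (if PySem.Set.equal (pvNewKeys (pvBuildParents menus) S) S then
          menus.filter (pvOk S)
        else pruneLoopB (pvBuildParents menus) menus (pvNewKeys (pvBuildParents menus) S))
  by_cases hB : PySem.Set.equal (pvNewKeys (pvBuildParents menus) S) S = true
  · -- B stops here
    have hSS' : pvMemEq (pvNewKeys (pvBuildParents menus) S) S := (pvSetEqual_iff _ _).mp hB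
    rw [if_pos hB]
    by_cases hA : (pvStepA r).length < r.length
    · -- A does one more (idempotent) round and then stops
      rw [dif_pos hA, pruneLoopA]
      have hmem2 : pvMemEq (pvSA (pvStepA r)) S :=
        fun x => ((f2 x).symm.trans (hSS' x))
      have hfix : pvStepA (pvStepA r) = pvStepA r := by
        show (pvStepA r).filter (pvOk (pvSA (pvStepA r))) = pvStepA r
        apply List.filter_eq_self.mpr
        intro m hm
        rw [pvOk_congr hmem2 m]
        exact ((hmemr' m).mp hm).2
      show (if _h : (pvStepA (pvStepA r)).length < (pvStepA r).length then
            pruneLoopA (pvStepA (pvStepA r)) else pvStepA (pvStepA r))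
          = menus.filter (pvOk S)
      rw [dif_neg (by rw [hfix]; exact Nat.lt_irrefl _), hfix, f3]
    · rw [dif_neg hA, f3]
  · -- B recurses; show A recurses too
    have hA : (pvStepA r).length < r.length := by
      rcases Nat.lt_or_ge (pvStepA r).length r.length with h | h
      · exact h
      · exfalso
        have hsubr : (pvStepA r).Sublist r := by rw [hstep]; exact List.filter_sublist
        have heq : pvStepA r = r := hsubr.eq_of_length (Nat.le_antisymm hsubr.length_le h)
        refine hB (pvSetEqual_of_memEq _ _ (fun x => ?_))
        rw [f2 x, heq]
        exact ((h3 x).symm)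
    rw [if_neg hB, dif_pos hA]
    have hlt : (pvNewKeys (pvBuildParents menus) S).length < S.length := by
      rcases Nat.lt_or_ge (pvNewKeys (pvBuildParents menus) S).length S.length with h | h
      · exact h
      · exfalso
        have heq := hsubS'.eq_of_length (Nat.le_antisymm hsubS'.length_le h)
        exact hB (by rw [heq]; exact pvSetEqual_of_memEq _ _ (fun x => Iff.rfl))
    refine IH _ _ hlt ?_ f2
    intro X hX
    rw [f3, List.filter_filter]
    refine List.filter_congr (fun m _ => ?_)
    cases hxm : pvOk X m with
    | false => rfl
    | true =>
      have hx' : ∀ x, x ∈ X → x ∈ S := fun x hx => hsubS'.mem (hX x hx)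
      rw [pvOk_mono hx' m hxm, Bool.and_true]

-- the joint induction: from linked states, the two loops return the same list
theorem pvMain (menus : List (List (String × String))) :
    ∀ (n : Nat) (S : PySem.Set String) (r : List (List (String × String))),
      S.length ≤ n →
      (∀ X : PySem.Set String, (∀ x, x ∈ X → x ∈ S) →
        r.filter (pvOk X) = menus.filter (pvOk X)) →
      pvMemEq S (pvSA r) →
      pruneLoopA r = pruneLoopB (pvBuildParents menus) menus S := by
  intro n
  induction n with
  | zero =>
    intro S r hlen h1 h3
    exact pvMainStep menus S r (fun S' r' hlt _ _ => absurd hlt (by omega)) h1 h3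
  | succ k ih =>
    intro S r hlen h1 h3
    exact pvMainStep menus S r
      (fun S' r' hlt h1' h3' => ih S' r' (by omega) h1' h3') h1 h3

-- ===== VERDICT (by name: the statement is the Claim_ definition above) =====
theorem prune_orphan_children_py_spec : Claim_equal_prune_orphan_children_py := by
  intro menus _
  unfold Spec_prune_orphan_children_py
  unfold prune_orphan_children_py prune_orphan_children_py_alt
  show pruneLoopA menus
      = pruneLoopB (pvBuildParents menus) menus (PySem.Set.ofList (pvBuildParents menus).keys)
  refine pvMain menus (PySem.Set.ofList (pvBuildParents menus).keys).length _ menus le_rfl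
    (fun X _ => rfl) ?_
  intro x
  rw [pvMem_SA]
  have hc : x ∈ PySem.Set.ofList (pvBuildParents menus).keys ↔
      (pvBuildParents menus).contains x = true := by
    rw [PySem.Set.mem_ofList]
    simp only [PySem.Dict.contains, PySem.Dict.keys, List.any_eq_true, List.mem_map,
      beq_iff_eq]
  rw [hc, pvBuildParents, pvBuildParents_contains]
  simp [PySem.Dict.contains_empty]
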